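-- pv_equiv track=rewrite | github.com/Heeko2b/Ateliers-de-programmation | Python/Atelier_3/Ex3.py | outputStr
-- ===== SOURCE A (Python) =====
-- def outputStr(mot:str, lpos:list)->str:
--     """Génère un string avec les lettres de mot aux indices de lpos et des _ sinon
--
--     Args:
--         mot (str): mot recherché
--         lpos (list): indices des lettres trouvées
--
--     Returns:
--         str: string avec les lettres de mot aux indices de lpos et des _ sinon
--     """
--     s=""
--     for i in range(len(mot)):
--         if i in lpos:
--             s+=mot[i]
--         else:
--             s+="_"
--     return s
-- ===== SOURCE B (Python) =====
-- def outputStr(mot: str, lpos: list) -> str: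
--     """Génère un string avec les lettres de mot aux indices de lpos et des _ sinon"""
--     out = ['_'] * len(mot)
--     for i in lpos:
--         if 0 <= i < len(mot):
--             out[i] = mot[i]
--     return ''.join(out)
-- ===== Notes on version B (the rewrite author's own statement) =====
-- stated objective: faster
-- what changed: B scatters: it pre-fills an underscore buffer and writes mot[i] at each in-range index of lpos, instead of scanning every position of mot and testing membership in lpos with a linear 'in'.
import Mathlib
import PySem

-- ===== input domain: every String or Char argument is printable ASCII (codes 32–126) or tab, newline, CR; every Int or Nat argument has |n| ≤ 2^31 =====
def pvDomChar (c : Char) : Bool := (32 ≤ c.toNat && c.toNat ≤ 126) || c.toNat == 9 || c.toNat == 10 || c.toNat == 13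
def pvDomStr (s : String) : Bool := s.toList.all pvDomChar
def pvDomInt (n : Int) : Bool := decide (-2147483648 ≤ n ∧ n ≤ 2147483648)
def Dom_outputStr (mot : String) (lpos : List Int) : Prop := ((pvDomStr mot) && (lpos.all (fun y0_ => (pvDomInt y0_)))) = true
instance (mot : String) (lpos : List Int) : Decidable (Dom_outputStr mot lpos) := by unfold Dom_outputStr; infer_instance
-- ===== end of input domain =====

-- B scatters letters into a pre-filled underscore buffer driven by lpos (one pass each),
-- instead of A's scan of every position with a linear membership test in lpos.


-- ===== PORT A =====
-- for i in range(len(mot)): s += mot[i] if i in lpos else '_'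
def outputStr (mot : String) (lpos : List Int) : String :=
  String.ofList ((PySem.List.pyRange 0 (mot.toList.length : Int) 1).foldl
    (fun s i => if i ∈ lpos then s ++ [PySem.List.pyGetD mot.toList i '_'] else s ++ ['_']) [])

-- ===== PORT B =====
-- out = ['_'] * len(mot); for i in lpos: if 0 <= i < len(mot): out[i] = mot[i]; return ''.join(out)
def outputStr_alt (mot : String) (lpos : List Int) : String :=
  String.ofList (lpos.foldl
    (fun out i => if 0 ≤ i ∧ i < (mot.toList.length : Int) then
        out.set i.toNat (mot.toList.getD i.toNat '_') else out)
    (List.replicate mot.toList.length '_'))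

-- ===== PRECONDITION & SPEC =====
def Spec_outputStr (mot : String) (lpos : List Int) (out : String) : Prop := out = outputStr_alt mot lpos
instance (mot : String) (lpos : List Int) (out : String) : Decidable (Spec_outputStr mot lpos out) := by unfold Spec_outputStr; infer_instance

-- ===== CLAIM (what is proved, stated in full; the proofs are below) =====
def Claim_equal_outputStr : Prop := ∀ (mot : String) (lpos : List Int), Dom_outputStr mot lpos → Spec_outputStr mot lpos (outputStr mot lpos)

-- ===== LEMMAS AND PROOFS =====

-- A's loop emits one character per index: it is a map over the range.
theorem emit_eq_map (lpos : List Int) (cs : List Char) (l : List Int) (acc : List Char) :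
    l.foldl (fun s i => if i ∈ lpos then s ++ [PySem.List.pyGetD cs i '_'] else s ++ ['_']) acc
      = acc ++ l.map (fun i => if i ∈ lpos then PySem.List.pyGetD cs i '_' else '_') := by
  induction l generalizing acc with
  | nil => simp
  | cons i l ih => simp only [List.foldl_cons, List.map_cons, ih]; split <;> simp

-- B's loop preserves the buffer length.
theorem scatter_length (cs : List Char) (n : Int) (l : List Int) (out : List Char) :
    (l.foldl (fun out i => if 0 ≤ i ∧ i < n then out.set i.toNat (cs.getD i.toNat '_') else out) out).length
      = out.length := by
  induction l generalizing out with
  | nil => rfl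
  | cons i l ih => simp only [List.foldl_cons]; rw [ih]; split <;> simp

-- B's loop places cs[j] exactly at the in-range indices occurring in l.
theorem scatter_getD (cs : List Char) (l : List Int) (out : List Char) (j : Nat)
    (hlen : out.length = cs.length) (hj : j < cs.length) :
    (l.foldl (fun out i => if 0 ≤ i ∧ i < (cs.length : Int) then out.set i.toNat (cs.getD i.toNat '_') else out) out).getD j '_'
      = if (j : Int) ∈ l then cs.getD j '_' else out.getD j '_' := by
  induction l generalizing out with
  | nil => simp
  | cons i l ih =>
    simp only [List.foldl_cons, List.mem_cons]
    by_cases hg : 0 ≤ i ∧ i < (cs.length : Int)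
    · rw [if_pos hg, ih _ (by simp [hlen])]
      by_cases hmem : (j : Int) ∈ l
      · simp [hmem]
      · by_cases hij : (j : Int) = i
        · have hi : i.toNat = j := by omega
          have hjo : j < out.length := by omega
          simp only [hij, true_or, if_pos, hi]
          simp [List.getD, hjo, hj]
        · have hne : i.toNat ≠ j := by omega
          simp only [hmem, hij, or_self, if_false]
          simp [List.getD, List.getElem?_set_ne hne]
    · rw [if_neg hg, ih _ hlen]
      have hij : (j : Int) ≠ i := by omega
      simp [hij]

-- ===== VERDICT (by name: the statement is the Claim_ definition above) =====
theorem outputStr_spec : Claim_equal_outputStr := by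
  intro mot lpos _
  unfold Spec_outputStr outputStr outputStr_alt
  set cs := mot.toList with hcs
  congr 1
  rw [emit_eq_map, List.nil_append]
  apply List.ext_getElem
  · rw [scatter_length]
    simp [PySem.List.length_pyRange_one]
  · intro j h1 h2
    have hj : j < cs.length := by
      simpa [PySem.List.length_pyRange_one] using h1
    have hA : (List.map (fun i => if i ∈ lpos then PySem.List.pyGetD cs i '_' else '_')
        (PySem.List.pyRange 0 (cs.length : Int) 1))[j] =
        if (j : Int) ∈ lpos then cs.getD j '_' else '_' := by
      simp [List.getElem_map, PySem.List.getElem_pyRange_one, PySem.List.pyGetD_natCast]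
    have hB : (lpos.foldl
        (fun out i => if 0 ≤ i ∧ i < (cs.length : Int) then out.set i.toNat (cs.getD i.toNat '_') else out)
        (List.replicate cs.length '_')).getD j '_'
        = if (j : Int) ∈ lpos then cs.getD j '_' else '_' := by
      rw [scatter_getD cs lpos _ j (by simp) hj]
      simp
    rw [hA, ← hB]
    exact List.getD_eq_getElem _ _ h2
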